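-- pv_equiv track=rewrite | github.com/khushidjobanputra/IS | vernam.py | vernam_encrypt
-- ===== SOURCE A (Python) =====
-- def vernam_encrypt(plaintext, key):
--     key = key * (len(plaintext) // len(key)) + key[:len(plaintext) % len(key)]  # Repeat the key if it's shorter than the plaintext
--     ciphertext = ""
--     for p, k in zip(plaintext, key):
--         p_val = ord(p.lower()) - ord('a')
--         k_val = ord(k.lower()) - ord('a')
--         xor_val = (p_val + k_val) % 26
--         ciphertext += chr(xor_val + ord('a'))
--     return ciphertext
-- ===== SOURCE B (Python) =====
-- def vernam_encrypt(plaintext, key):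
--     # Precompute numeric shift table from the key once, then encrypt the
--     # plaintext block-by-block (key-sized slices), zipping each block with
--     # the shift table directly: no repeated-key string, no per-char key math.
--     shifts = [(ord(k.lower()) - ord('a')) % 26 for k in key]
--     blocks = []
--     for start in range(0, len(plaintext), len(key)):
--         block = plaintext[start:start + len(key)]
--         blocks.append(''.join(chr((ord(p.lower()) - ord('a') + s) % 26 + ord('a'))
--                               for p, s in zip(block, shifts)))
--     return ''.join(blocks)
-- ===== Notes on version B (the rewrite author's own statement) =====
-- stated objective: alternative
-- what changed: B drops A's materialized repeated-key string and per-character accumulator loop; it precomputes a numeric shift table from the key once, then encrypts the plaintext block-by-block (key-sized slices zipped against the shift table) and joins the blocks.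
import Mathlib
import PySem

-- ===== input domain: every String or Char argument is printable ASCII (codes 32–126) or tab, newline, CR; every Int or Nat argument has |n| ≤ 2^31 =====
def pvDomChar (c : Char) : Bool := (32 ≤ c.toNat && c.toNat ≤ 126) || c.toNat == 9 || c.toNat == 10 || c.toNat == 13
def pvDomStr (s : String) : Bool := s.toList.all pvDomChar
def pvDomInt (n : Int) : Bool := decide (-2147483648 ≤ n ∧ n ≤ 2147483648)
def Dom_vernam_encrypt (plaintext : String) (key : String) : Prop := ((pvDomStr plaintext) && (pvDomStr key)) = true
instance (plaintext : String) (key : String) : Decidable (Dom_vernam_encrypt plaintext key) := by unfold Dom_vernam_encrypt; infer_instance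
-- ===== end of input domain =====

-- B replaces A's repeated-key preprocessing and per-character accumulator loop by a
-- precomputed numeric shift table plus blockwise encryption: the plaintext is cut into
-- key-sized blocks and each block is zipped against the shift table (alternative
-- decomposition; same cost).


-- ===== PORT A =====
-- key = key * (len(plaintext) // len(key)) + key[:len(plaintext) % len(key)];
-- then fold over zip(plaintext, key) accumulating ciphertext += chr(...).
def vernam_encrypt (plaintext : String) (key : String) : String :=
  let pl := plaintext.toList
  let kl := key.toList
  let ext := PySem.List.pyRepeat kl (PySem.Int.floordiv (pl.length : Int) (kl.length : Int))
             ++ PySem.List.slice kl none (some (PySem.Int.mod (pl.length : Int) (kl.length : Int)))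
  String.ofList ((pl.zip ext).foldl
    (fun acc pk =>
      let p_val : Int := ((PySem.Chars.lowerChar pk.1).toNat : Int) - 97
      let k_val : Int := ((PySem.Chars.lowerChar pk.2).toNat : Int) - 97
      acc ++ [Char.ofNat (PySem.Int.mod (p_val + k_val) 26 + 97).toNat]) [])

-- ===== PORT B =====
-- shifts = [(ord(k.lower())-ord('a')) % 26 for k in key]  (computed once);
-- for start in range(0, len(plaintext), len(key)): encrypt plaintext[start:start+len(key)]
-- zipped with shifts, append the block; ''.join(blocks) ports as flatten.
def vernam_encrypt_alt (plaintext : String) (key : String) : String :=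
  let pl := plaintext.toList
  let kl := key.toList
  let shifts : List Int :=
    kl.map (fun k => PySem.Int.mod (((PySem.Chars.lowerChar k).toNat : Int) - 97) 26)
  let blocks := (PySem.List.pyRange 0 (pl.length : Int) (kl.length : Int)).foldl
    (fun acc start =>
      acc ++ [((PySem.List.slice pl (some start) (some (start + (kl.length : Int)))).zip shifts).map
        (fun ps =>
          Char.ofNat (PySem.Int.mod ((((PySem.Chars.lowerChar ps.1).toNat : Int) - 97) + ps.2) 26
            + 97).toNat)])
    []
  String.ofList blocks.flatten

-- ===== PRECONDITION & SPEC =====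
-- Pre_ excludes exactly the empty key, on which Python A raises ZeroDivisionError
-- (and B raises ValueError from range(..., 0)).
def Pre_vernam_encrypt (plaintext : String) (key : String) : Prop := key ≠ ""
instance (plaintext : String) (key : String) : Decidable (Pre_vernam_encrypt plaintext key) := by unfold Pre_vernam_encrypt; infer_instance
def pvWitness_vernam_encrypt : String × String := ("Hello, World!", "key")

def Spec_vernam_encrypt (plaintext : String) (key : String) (out : String) : Prop := out = vernam_encrypt_alt plaintext key
instance (plaintext : String) (key : String) (out : String) : Decidable (Spec_vernam_encrypt plaintext key out) := by unfold Spec_vernam_encrypt; infer_instance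

-- ===== CLAIM (what is proved, stated in full; the proofs are below) =====
def Claim_equal_vernam_encrypt : Prop := ∀ (plaintext : String) (key : String), Dom_vernam_encrypt plaintext key → Pre_vernam_encrypt plaintext key → Spec_vernam_encrypt plaintext key (vernam_encrypt plaintext key)

-- ===== LEMMAS AND PROOFS =====

-- the per-character arithmetic of A (full key char) …
def pvEnc (p k : Char) : Char :=
  Char.ofNat (PySem.Int.mod ((((PySem.Chars.lowerChar p).toNat : Int) - 97)
    + (((PySem.Chars.lowerChar k).toNat : Int) - 97)) 26 + 97).toNat

-- … and of B (precomputed shift)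
def pvShift (k : Char) : Int :=
  PySem.Int.mod (((PySem.Chars.lowerChar k).toNat : Int) - 97) 26

def pvEncS (p : Char) (s : Int) : Char :=
  Char.ofNat (PySem.Int.mod ((((PySem.Chars.lowerChar p).toNat : Int) - 97) + s) 26 + 97).toNat

theorem pv_enc_shift (p k : Char) : pvEncS p (pvShift k) = pvEnc p k := by
  unfold pvEncS pvShift pvEnc
  congr 2
  have hf : ∀ x : Int, PySem.Int.mod x 26 = x % 26 := by
    intro x
    rw [PySem.Int.mod, Int.fmod_eq_emod, if_pos (Or.inl (by norm_num))]
    ring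
  rw [hf, hf, hf]
  omega

theorem pv_foldl_append {α β : Type} (g : α → β) :
    ∀ (l : List α) (init : List β),
      l.foldl (fun acc x => acc ++ [g x]) init = init ++ l.map g := by
  intro l
  induction l with
  | nil => simp
  | cons x t ih => intro init; simp [ih]

-- i-th element of the extended key is kl[i % kl.length]
theorem pv_ext_get (kl : List Char) (hk : kl ≠ []) :
    ∀ (q r j : Nat), r ≤ kl.length → j < q * kl.length + r →
      ((List.replicate q kl).flatten ++ kl.take r)[j]? = kl[j % kl.length]? := by
  intro q
  induction q with
  | zero =>
    intro r j hr hj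
    simp only [List.replicate_zero, List.flatten_nil, List.nil_append]
    have hjr : j < r := by omega
    have hjn : j < kl.length := by omega
    rw [List.getElem?_take_of_lt hjr, Nat.mod_eq_of_lt hjn]
  | succ q ih =>
    intro r j hr hj
    have hn : 0 < kl.length := List.length_pos_iff.mpr hk
    simp only [List.replicate_succ, List.flatten_cons, List.append_assoc]
    by_cases hjk : j < kl.length
    · rw [List.getElem?_append_left hjk, Nat.mod_eq_of_lt hjk]
    · rw [Nat.not_lt] at hjk
      rw [List.getElem?_append_right hjk]
      have h1 : j - kl.length < q * kl.length + r := by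
        have hm : (q + 1) * kl.length = q * kl.length + kl.length := by ring
        omega
      have h2 := ih r (j - kl.length) hr h1
      rw [h2]
      have : j - kl.length + kl.length = j := by omega
      conv_rhs => rw [← this]
      rw [Nat.add_mod_right]

-- A's zip-with-extended-key pass, expressed index by index
theorem pv_main (pl kl : List Char) (hk : kl ≠ []) :
    ((pl.zip (PySem.List.pyRepeat kl (PySem.Int.floordiv (pl.length : Int) (kl.length : Int))
        ++ PySem.List.slice kl none (some (PySem.Int.mod (pl.length : Int) (kl.length : Int))))).foldl
      (fun acc pk => acc ++ [pvEnc pk.1 pk.2]) [])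
    = (PySem.List.enumerate pl).map
        (fun ip => pvEnc ip.2 (PySem.List.pyGetD kl (PySem.Int.mod ip.1 (kl.length : Int)) 'a')) := by
  have hn : 0 < kl.length := List.length_pos_iff.mpr hk
  have hrm : pl.length % kl.length < kl.length := Nat.mod_lt _ hn
  have hdm : pl.length / kl.length * kl.length + pl.length % kl.length = pl.length :=
    Nat.div_add_mod' pl.length kl.length
  have hfl : ∀ (q : Nat), ((List.replicate q kl).flatten).length = q * kl.length := by
    intro q
    induction q with
    | zero => simp
    | succ q ih => simp [List.replicate_succ, ih, Nat.succ_mul]; omega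
  have hrepeat : PySem.List.pyRepeat kl (PySem.Int.floordiv (pl.length : Int) (kl.length : Int))
      = (List.replicate (pl.length / kl.length) kl).flatten := by
    rw [PySem.Int.floordiv, ← Int.ofNat_fdiv]
    simp only [PySem.List.pyRepeat, Int.toNat_natCast]
  have hslice : PySem.List.slice kl none (some (PySem.Int.mod (pl.length : Int) (kl.length : Int)))
      = kl.take (pl.length % kl.length) := by
    rw [PySem.Int.mod, ← Int.ofNat_fmod, PySem.List.slice_to_natCast]
  rw [pv_foldl_append, List.nil_append, hrepeat, hslice]
  have hextlen : ((List.replicate (pl.length / kl.length) kl).flatten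
      ++ kl.take (pl.length % kl.length)).length = pl.length := by
    simp only [List.length_append, hfl, List.length_take]
    omega
  apply List.ext_getElem?
  intro j
  by_cases hj : j < pl.length
  · have hze : j < (pl.zip ((List.replicate (pl.length / kl.length) kl).flatten
        ++ kl.take (pl.length % kl.length))).length := by
      rw [List.length_zip, hextlen]; omega
    have hen : j < (PySem.List.enumerate pl 0).length := by
      rw [PySem.List.length_enumerate]; exact hj
    rw [List.getElem?_map, List.getElem?_map,
        List.getElem?_eq_getElem hze, List.getElem?_eq_getElem hen]
    simp only [Option.map_some, List.getElem_zip, PySem.List.getElem_enumerate]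
    have hjm : j % kl.length < kl.length := Nat.mod_lt _ hn
    have hext := pv_ext_get kl hk (pl.length / kl.length) (pl.length % kl.length) j
      (le_of_lt hrm) (by omega)
    rw [List.getElem?_eq_getElem (by omega : j < ((List.replicate (pl.length / kl.length) kl).flatten
        ++ kl.take (pl.length % kl.length)).length),
      List.getElem?_eq_getElem hjm] at hext
    have h1 := Option.some.inj hext
    rw [h1]
    have h2 : PySem.Int.mod ((0 : Int) + (j : Int)) (kl.length : Int) = ((j % kl.length : Nat) : Int) := by
      rw [zero_add, PySem.Int.mod, ← Int.ofNat_fmod]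
    rw [h2]
    rw [PySem.List.pyGetD, PySem.List.pyGet?_natCast, List.getElem?_eq_getElem hjm, Option.getD_some]
  · have h1 : (pl.zip ((List.replicate (pl.length / kl.length) kl).flatten
        ++ kl.take (pl.length % kl.length))).length ≤ j := by
      rw [List.length_zip, hextlen]; omega
    have h2 : (PySem.List.enumerate pl 0).length ≤ j := by
      rw [PySem.List.length_enumerate]; omega
    rw [List.getElem?_map, List.getElem?_map, List.getElem?_eq_none h1, List.getElem?_eq_none h2]
    rfl

-- pyRange with a positive step: nil and cons unfoldings
theorem pv_pyRange_pos_nil (a b s : Int) (hs : 0 < s) (h : b ≤ a) :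
    PySem.List.pyRange a b s = [] := by
  rw [PySem.List.pyRange_of_pos _ _ hs, if_neg (by omega)]
  simp

theorem pv_pyRange_pos_cons (a b s : Int) (hs : 0 < s) (h : a < b) :
    PySem.List.pyRange a b s = a :: PySem.List.pyRange (a + s) b s := by
  rw [PySem.List.pyRange_of_pos _ _ hs, PySem.List.pyRange_of_pos _ _ hs, if_pos h]
  have hcount : ((b - a + s - 1) / s).toNat
      = (if a + s < b then ((b - (a + s) + s - 1) / s).toNat else 0) + 1 := by
    by_cases h2 : a + s < b
    · rw [if_pos h2]
      have he : b - a + s - 1 = (b - (a + s) + s - 1) + 1 * s := by ring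
      rw [he, Int.add_mul_ediv_right _ _ (by omega : s ≠ 0)]
      have hge : 0 ≤ (b - (a + s) + s - 1) / s :=
        Int.ediv_nonneg (by omega) (by omega)
      omega
    · rw [if_neg h2]
      have he : b - a + s - 1 = (b - a - 1) + 1 * s := by ring
      rw [he, Int.add_mul_ediv_right _ _ (by omega : s ≠ 0)]
      rw [Int.ediv_eq_zero_of_lt (by omega) (by omega)]
      rfl
  rw [hcount, List.range_succ_eq_map]
  simp only [List.map_cons, List.map_map]
  refine congrArg₂ List.cons (by simp) ?_
  apply List.map_congr_left
  intro k _
  simp only [Function.comp_apply]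
  push_cast
  ring

-- one block of B equals the corresponding stretch of the indexed form
theorem pv_block (pl kl : List Char) (hk : kl ≠ []) (q : Nat)
    (hlt : ((q * kl.length : Nat) : Int) < (pl.length : Int)) :
    ((PySem.List.slice pl (some ((q * kl.length : Nat) : Int))
        (some (((q * kl.length : Nat) : Int) + (kl.length : Int)))).zip
        (kl.map pvShift)).map (fun ps => pvEncS ps.1 ps.2)
    = (PySem.List.pyRange ((q * kl.length : Nat) : Int)
        (min (((q * kl.length : Nat) : Int) + (kl.length : Int)) (pl.length : Int)) 1).map
        (fun j => pvEnc (PySem.List.pyGetD pl j ' ')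
          (PySem.List.pyGetD kl (PySem.Int.mod j (kl.length : Int)) 'a')) := by
  have hn : 0 < kl.length := List.length_pos_iff.mpr hk
  set aN : Nat := q * kl.length with haN
  have hltN : aN < pl.length := by exact_mod_cast hlt
  have hsl : PySem.List.slice pl (some (aN : Int)) (some ((aN : Int) + (kl.length : Int)))
      = (pl.drop aN).take kl.length := PySem.List.slice_natCast_add pl aN kl.length
  rw [hsl]
  have hlen : (((pl.drop aN).take kl.length).zip (kl.map pvShift)).length
      = min kl.length (pl.length - aN) := by
    simp [List.length_zip, List.length_take, List.length_drop]
  have hrlen : (PySem.List.pyRange (aN : Int)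
      (min ((aN : Int) + (kl.length : Int)) (pl.length : Int)) 1).length
      = min kl.length (pl.length - aN) := by
    rw [PySem.List.length_pyRange_one]
    omega
  apply List.ext_getElem
  · simp only [List.length_map, hlen, hrlen]
  · intro j h1 h2
    simp only [List.length_map, hlen] at h1
    simp only [List.length_map, hrlen] at h2
    rw [List.getElem_map, List.getElem_map, List.getElem_zip,
        PySem.List.getElem_pyRange_one]
    have hjn : j < kl.length := by omega
    have hjL : aN + j < pl.length := by omega
    have hja : (aN : Int) + (j : Int) = ((aN + j : Nat) : Int) := by push_cast; ring
    have hp : ((pl.drop aN).take kl.length)[j]'(by simp; omega) = pl[aN + j]'hjL := by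
      rw [List.getElem_take, List.getElem_drop]
    have hmod : PySem.Int.mod ((aN + j : Nat) : Int) (kl.length : Int) = (j : Int) := by
      rw [PySem.Int.mod, ← Int.ofNat_fmod]
      have hm : (aN + j) % kl.length = j := by
        rw [haN, Nat.add_comm, Nat.add_mul_mod_self_right, Nat.mod_eq_of_lt hjn]
      rw [hm]
    rw [hja, hmod]
    rw [List.getElem_map, hp]
    rw [pv_enc_shift]
    congr 1
    · rw [PySem.List.pyGetD, PySem.List.pyGet?_natCast,
        List.getElem?_eq_getElem hjL, Option.getD_some]
    · rw [PySem.List.pyGetD, PySem.List.pyGet?_natCast,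
        List.getElem?_eq_getElem hjn, Option.getD_some]

-- chunked traversal equals the indexed traversal
theorem pv_chunks (pl kl : List Char) (hk : kl ≠ []) :
    ∀ (t : Nat) (q : Nat), (pl.length - q * kl.length) ≤ t * kl.length →
    ((PySem.List.pyRange ((q * kl.length : Nat) : Int) (pl.length : Int) (kl.length : Int)).map
        (fun start => ((PySem.List.slice pl (some start) (some (start + (kl.length : Int)))).zip
          (kl.map pvShift)).map (fun ps => pvEncS ps.1 ps.2))).flatten
    = (PySem.List.pyRange ((q * kl.length : Nat) : Int) (pl.length : Int) 1).map
        (fun j => pvEnc (PySem.List.pyGetD pl j ' ')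
          (PySem.List.pyGetD kl (PySem.Int.mod j (kl.length : Int)) 'a')) := by
  have hn : 0 < kl.length := List.length_pos_iff.mpr hk
  have hns : (0 : Int) < (kl.length : Int) := by exact_mod_cast hn
  intro t
  induction t with
  | zero =>
    intro q hq
    have hge : (pl.length : Int) ≤ ((q * kl.length : Nat) : Int) := by
      have : pl.length ≤ q * kl.length := by omega
      exact_mod_cast this
    rw [pv_pyRange_pos_nil _ _ _ hns hge, PySem.List.pyRange_one_eq_nil hge]
    simp
  | succ t ih =>
    intro q hq
    by_cases hlt : ((q * kl.length : Nat) : Int) < (pl.length : Int)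
    · rw [pv_pyRange_pos_cons _ _ _ hns hlt]
      have hstep : ((q * kl.length : Nat) : Int) + (kl.length : Int)
          = (((q + 1) * kl.length : Nat) : Int) := by push_cast; ring
      rw [List.map_cons, List.flatten_cons]
      rw [pv_block pl kl hk q hlt]
      have hq' : pl.length - (q + 1) * kl.length ≤ t * kl.length := by
        have hm1 : (q + 1) * kl.length = q * kl.length + kl.length := by ring
        have hm2 : (t + 1) * kl.length = t * kl.length + kl.length := by ring
        omega
      rw [hstep, ih (q + 1) hq']
      by_cases h2 : (((q + 1) * kl.length : Nat) : Int) ≤ (pl.length : Int)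
      · rw [min_eq_left h2, ← List.map_append,
          ← PySem.List.pyRange_one_append ((q * kl.length : Nat) : Int)
            (((q + 1) * kl.length : Nat) : Int) (pl.length : Int)
            (by
              have : q * kl.length ≤ (q + 1) * kl.length :=
                Nat.mul_le_mul_right _ (by omega)
              exact_mod_cast this) h2]
      · have hLle : (pl.length : Int) ≤ (((q + 1) * kl.length : Nat) : Int) :=
          le_of_not_ge h2
        rw [min_eq_right hLle, PySem.List.pyRange_one_eq_nil hLle,
          List.map_nil, List.append_nil]
    · have hge : (pl.length : Int) ≤ ((q * kl.length : Nat) : Int) := by omega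
      rw [pv_pyRange_pos_nil _ _ _ hns hge, PySem.List.pyRange_one_eq_nil hge]
      simp

-- ===== VERDICT (by name: the statement is the Claim_ definition above) =====
theorem vernam_encrypt_spec : Claim_equal_vernam_encrypt := by
  intro plaintext key _hdom hpre
  unfold Spec_vernam_encrypt vernam_encrypt vernam_encrypt_alt
  have hk : key.toList ≠ [] := by
    intro h
    apply hpre
    apply String.ext
    simpa using h
  apply congrArg String.ofList
  have e1 : (fun (acc : List Char) (pk : Char × Char) =>
      let p_val : Int := ((PySem.Chars.lowerChar pk.1).toNat : Int) - 97
      let k_val : Int := ((PySem.Chars.lowerChar pk.2).toNat : Int) - 97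
      acc ++ [Char.ofNat (PySem.Int.mod (p_val + k_val) 26 + 97).toNat])
      = (fun acc pk => acc ++ [pvEnc pk.1 pk.2]) := rfl
  have e2 : (fun (ps : Char × Int) =>
      Char.ofNat (PySem.Int.mod ((((PySem.Chars.lowerChar ps.1).toNat : Int) - 97) + ps.2) 26
        + 97).toNat) = (fun ps => pvEncS ps.1 ps.2) := rfl
  have e3 : (fun (k : Char) => PySem.Int.mod (((PySem.Chars.lowerChar k).toNat : Int) - 97) 26)
      = pvShift := rfl
  rw [e1, e2, e3]
  rw [pv_foldl_append
    (fun start => ((PySem.List.slice plaintext.toList (some start)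
        (some (start + (key.toList.length : Int)))).zip
      (key.toList.map pvShift)).map (fun ps => pvEncS ps.1 ps.2)), List.nil_append]
  have hB := pv_chunks plaintext.toList key.toList hk plaintext.toList.length 0
    (by
      have hn : 0 < key.toList.length := List.length_pos_iff.mpr hk
      simpa using Nat.le_mul_of_pos_right plaintext.toList.length hn)
  have hz : ((0 * key.toList.length : Nat) : Int) = (0 : Int) := by simp
  rw [hz] at hB
  rw [pv_main plaintext.toList key.toList hk]
  rw [PySem.List.enumerate_eq_map_pyRange plaintext.toList ' ', List.map_map]
  rw [hB]
  rfl
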